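-- pv_equiv track=rewrite | github.com/Sundeep-m-k/Fandom-Span-Retrieval | archive/14_prepare_span_id_dataset_paragraph_nopunct.py | strip_punct_with_mapping
-- ===== SOURCE A (Python) =====
-- import unicodedata
-- from typing import Any, Dict, List, Tuple
--
-- def is_punctuation(ch: str) -> bool:
--     """Unicode punctuation check (covers ASCII + fancy punctuation)."""
--     return unicodedata.category(ch).startswith("P")
--
-- def strip_punct_with_mapping(text: str) -> Tuple[str, List[int]]:
--     """
--     Remove punctuation from text and build an old->new index mapping.
--
--     Returns:
--       new_text
--       old2new: length len(text)+1; old2new[i] = new length after processing text[:i]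
--     """
--     out_chars: List[str] = []
--     old2new: List[int] = [0] * (len(text) + 1)
--
--     new_i = 0
--     for i, ch in enumerate(text):
--         old2new[i] = new_i
--         if not is_punctuation(ch):
--             out_chars.append(ch)
--             new_i += 1
--
--     old2new[len(text)] = new_i
--     return "".join(out_chars), old2new
-- ===== SOURCE B (Python) =====
-- import unicodedata
-- from typing import List, Tuple
--
-- def is_punctuation(ch: str) -> bool:
--     return unicodedata.category(ch).startswith("P")
--
-- def strip_punct_with_mapping(text: str) -> Tuple[str, List[int]]:
--     # Three separated passes: boolean keep-mask, filter-join, prefix sums of the mask.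
--     keep = [not is_punctuation(ch) for ch in text]
--     new_text = "".join(ch for ch, k in zip(text, keep) if k)
--     old2new = [0] * (len(keep) + 1)
--     for i, k in enumerate(keep):
--         old2new[i + 1] = old2new[i] + k
--     return new_text, old2new
-- ===== Notes on version B (the rewrite author's own statement) =====
-- stated objective: alternative
-- what changed: A's single interleaved loop with a running counter and in-place writes into a preallocated list is replaced by three separated passes: a boolean keep-mask, a zip-filter join for the new text, and a prefix-sum (scan) of the mask for old2new.
import Mathlib
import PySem

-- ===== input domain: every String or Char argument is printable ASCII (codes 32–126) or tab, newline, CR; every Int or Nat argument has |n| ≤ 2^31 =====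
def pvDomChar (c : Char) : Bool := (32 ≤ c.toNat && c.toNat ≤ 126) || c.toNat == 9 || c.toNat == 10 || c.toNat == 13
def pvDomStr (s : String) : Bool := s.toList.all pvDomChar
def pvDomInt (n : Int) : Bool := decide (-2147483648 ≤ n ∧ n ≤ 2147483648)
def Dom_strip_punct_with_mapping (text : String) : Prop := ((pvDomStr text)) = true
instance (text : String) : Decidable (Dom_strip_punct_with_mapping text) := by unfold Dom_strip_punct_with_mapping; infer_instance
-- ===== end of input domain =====

-- B replaces A's single interleaved counter loop by three separated passes:
-- keep-mask, zip-filter join, and a prefix-sum scan of the mask.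

-- ===== PORT A =====
-- unicodedata.category(ch).startswith("P"): exact on the printable-ASCII + tab/newline/CR domain,
-- where the Unicode punctuation characters are exactly these 23.
def is_punctuation (ch : Char) : Bool :=
  (['!', '"', '#', '%', '&', '\'', '(', ')', '*', ',', '-', '.', '/',
    ':', ';', '?', '@', '[', '\\', ']', '_', '{', '}']).contains ch

-- the `for i, ch in enumerate(text)` loop: state (out_chars, old2new, new_i), index i carried explicitly
def pvLoopA : List Char → Nat → List Char → List Int → Int → List Char × List Int × Int
  | [], _i, out, m, ni => (out, m, ni)
  | ch :: rest, i, out, m, ni =>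
    if !(is_punctuation ch) then
      pvLoopA rest (i + 1) (out ++ [ch]) (m.set i ni) (ni + 1)
    else
      pvLoopA rest (i + 1) out (m.set i ni) ni

def strip_punct_with_mapping (text : String) : String × List Int :=
  let cs := text.toList
  let r := pvLoopA cs 0 [] (List.replicate (cs.length + 1) 0) 0
  (String.ofList r.1, r.2.1.set cs.length r.2.2)

-- ===== PORT B =====
def strip_punct_with_mapping_alt (text : String) : String × List Int :=
  let keep := text.toList.map (fun ch => !(is_punctuation ch))
  let newText := String.ofList ((text.toList.zip keep).filterMap (fun p => if p.2 then some p.1 else none))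
  -- the prefix-sum loop old2new[i+1] = old2new[i] + k, started from [0], is a left scan
  let old2new := keep.scanl (fun acc k => acc + (if k then (1 : Int) else 0)) 0
  (newText, old2new)

-- ===== PRECONDITION & SPEC =====
def Spec_strip_punct_with_mapping (text : String) (out : String × List Int) : Prop := out = strip_punct_with_mapping_alt text
instance (text : String) (out : String × List Int) : Decidable (Spec_strip_punct_with_mapping text out) := by unfold Spec_strip_punct_with_mapping; infer_instance

-- ===== CLAIM (what is proved, stated in full; the proofs are below) =====
def Claim_equal_strip_punct_with_mapping : Prop := ∀ (text : String), Dom_strip_punct_with_mapping text → Spec_strip_punct_with_mapping text (strip_punct_with_mapping text)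

-- ===== LEMMAS AND PROOFS =====

theorem pv_set_append_len {α : Type} (pre l : List α) (a : α) :
    (pre ++ l).set pre.length a = pre ++ l.set 0 a := by
  induction pre with
  | nil => simp
  | cons x xs ih => simp [ih]

theorem pv_scanl_ne_nil (f : Int → Bool → Int) (z : Int) (l : List Bool) :
    List.scanl f z l ≠ [] := by
  cases l <;> simp [List.scanl]

theorem pv_scanl_decomp (l : List Bool) (z : Int) :
    List.scanl (fun acc k => acc + (if k then (1 : Int) else 0)) z l
      = (List.scanl (fun acc k => acc + (if k then (1 : Int) else 0)) z l).dropLast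
        ++ [l.foldl (fun acc k => acc + (if k then (1 : Int) else 0)) z] := by
  induction l generalizing z with
  | nil => simp
  | cons b r ih =>
    rw [List.scanl_cons, List.foldl_cons]
    rw [List.dropLast_cons_of_ne_nil (pv_scanl_ne_nil _ _ _), List.cons_append]
    exact congrArg _ (ih _)

theorem pv_length_dropLast_scanl (l : List Bool) (z : Int) :
    ((List.scanl (fun acc k => acc + (if k then (1 : Int) else 0)) z l).dropLast).length
      = l.length := by
  simp [List.length_dropLast, List.length_scanl]

theorem pv_zip_map_filter (cs : List Char) :
    ((cs.zip (cs.map (fun ch => !(is_punctuation ch)))).filterMap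
        (fun p => if p.2 then some p.1 else none))
      = cs.filter (fun ch => !(is_punctuation ch)) := by
  induction cs with
  | nil => rfl
  | cons c r ih =>
    simp only [List.map, List.zip_cons_cons, List.filterMap, List.filter]
    by_cases h : is_punctuation c = true <;> simp [h, ih]

theorem pv_loopA_eq (cs : List Char) : ∀ (pre : List Int) (out : List Char) (ni : Int),
    pvLoopA cs pre.length out (pre ++ List.replicate (cs.length + 1) 0) ni
      = (out ++ cs.filter (fun ch => !(is_punctuation ch)),
         pre ++ ((cs.map (fun ch => !(is_punctuation ch))).scanl
                   (fun acc k => acc + (if k then (1 : Int) else 0)) ni).dropLast ++ [0],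
         (cs.map (fun ch => !(is_punctuation ch))).foldl
           (fun acc k => acc + (if k then (1 : Int) else 0)) ni) := by
  induction cs with
  | nil => intro pre out ni; simp [pvLoopA, List.scanl]
  | cons c r ih =>
    intro pre out ni
    have hset : (pre ++ List.replicate (r.length + 1 + 1) 0).set pre.length ni
        = (pre ++ [ni]) ++ List.replicate (r.length + 1) 0 := by
      rw [pv_set_append_len]
      simp [List.replicate_succ]
    by_cases h : is_punctuation c = true
    · simp only [pvLoopA, h, Bool.not_true, Bool.false_eq_true, if_false, List.length_cons]
      rw [hset]
      have := ih (pre ++ [ni]) out ni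
      simp only [List.length_append, List.length_cons, List.length_nil] at this
      rw [this]
      simp only [List.map, List.filter, List.foldl, h, Bool.not_true,
        if_neg (by decide : ¬ (false = true)), List.scanl_cons]
      rw [List.dropLast_cons_of_ne_nil (pv_scanl_ne_nil _ _ _)]
      simp
    · have h' : is_punctuation c = false := by simp_all
      simp only [pvLoopA, h', Bool.not_false, if_true, List.length_cons]
      rw [hset]
      have := ih (pre ++ [ni]) (out ++ [c]) (ni + 1)
      simp only [List.length_append, List.length_cons, List.length_nil] at this
      rw [this]
      simp only [List.map, List.filter, List.foldl, h', Bool.not_false, if_true, List.scanl_cons]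
      rw [List.dropLast_cons_of_ne_nil (pv_scanl_ne_nil _ _ _)]
      simp

-- ===== VERDICT (by name: the statement is the Claim_ definition above) =====
theorem strip_punct_with_mapping_spec : Claim_equal_strip_punct_with_mapping := by
  intro text _hdom
  have h := pv_loopA_eq text.toList [] [] 0
  simp only [List.length_nil, List.nil_append] at h
  simp only [Spec_strip_punct_with_mapping, strip_punct_with_mapping,
    strip_punct_with_mapping_alt, h, Prod.mk.injEq]
  constructor
  · rw [pv_zip_map_filter]
  · have hlen : text.toList.length
        = (((text.toList.map (fun ch => !(is_punctuation ch))).scanl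
            (fun acc k => acc + (if k then (1 : Int) else 0)) 0).dropLast).length := by
      rw [pv_length_dropLast_scanl]; simp
    rw [hlen, pv_set_append_len]
    simp only [List.set]
    exact (pv_scanl_decomp _ 0).symm
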